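-- pv_equiv track=rewrite | github.com/aran-tia/python-start | day26_problem10.py | get_most_numbers
-- ===== SOURCE A (Python) =====
-- def get_most_numbers(numbers):
--     count = {}
--
--     for n in numbers:
--         if n % 2 == 1:
--             if n in count:
--                 count[n] += 1
--             else:
--                 count[n] = 1
--
--     result = []
--
--     for k, v in count.items():
--         if v == 1:
--             result.append(k)
--
--     return result
--
-- numbers = [1, 2, 2, 3, 3, 3, 4, 5, 5, 6]
-- ===== SOURCE B (Python) =====
-- def get_most_numbers(numbers):
--     return [n for n in numbers if n % 2 == 1 and numbers.count(n) == 1]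
-- ===== Notes on version B (the rewrite author's own statement) =====
-- stated objective: simpler
-- what changed: Replaced the count-dictionary build plus second pass over its items by a single comprehension that keeps each odd element whose total occurrence count in the list is 1 (rescanning with .count instead of precomputing a table).
import Mathlib
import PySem

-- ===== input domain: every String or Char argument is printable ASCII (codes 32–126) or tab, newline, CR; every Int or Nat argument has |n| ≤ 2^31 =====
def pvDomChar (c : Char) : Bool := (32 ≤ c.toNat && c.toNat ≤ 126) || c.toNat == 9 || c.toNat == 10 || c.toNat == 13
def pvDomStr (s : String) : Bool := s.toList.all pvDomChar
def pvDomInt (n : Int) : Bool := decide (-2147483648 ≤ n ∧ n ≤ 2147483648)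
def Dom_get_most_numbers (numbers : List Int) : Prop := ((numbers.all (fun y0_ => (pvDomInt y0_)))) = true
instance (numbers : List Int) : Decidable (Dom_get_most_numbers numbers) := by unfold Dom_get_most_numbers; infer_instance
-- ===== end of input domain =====

-- B replaces A's count-dictionary build plus a second pass over its items by a single
-- comprehension that rescans the list with .count (simpler, not faster); same return value.

-- ===== PORT A =====
def get_most_numbers (numbers : List Int) : List Int :=
  let count : PySem.Dict Int Int :=
    numbers.foldl (fun count n =>
      if PySem.Int.mod n 2 == 1 then
        if count.contains n then count.insert n (count.getD n 0 + 1)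
        else count.insert n 1
      else count) PySem.Dict.empty
  count.items.foldl (fun result kv => if kv.2 == 1 then result ++ [kv.1] else result) []

-- ===== PORT B =====
def get_most_numbers_alt (numbers : List Int) : List Int :=
  numbers.filter (fun n => PySem.Int.mod n 2 == 1 && numbers.count n == 1)

-- ===== PRECONDITION & SPEC =====
def Spec_get_most_numbers (numbers : List Int) (out : List Int) : Prop := out = get_most_numbers_alt numbers
instance (numbers : List Int) (out : List Int) : Decidable (Spec_get_most_numbers numbers out) := by unfold Spec_get_most_numbers; infer_instance

-- ===== CLAIM (what is proved, stated in full; the proofs are below) =====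
def Claim_equal_get_most_numbers : Prop := ∀ (numbers : List Int), Dom_get_most_numbers numbers → Spec_get_most_numbers numbers (get_most_numbers numbers)

-- ===== LEMMAS AND PROOFS =====

-- Filtering a set built by first-insertion-order insertion equals filtering the source list,
-- provided the filter only accepts elements occurring at most once overall.
theorem filter_foldl_set_add (q : Int → Bool) :
    ∀ (l s : List Int), (∀ x, q x = true → l.count x + s.count x ≤ 1) →
      List.filter q (l.foldl PySem.Set.add s) = s.filter q ++ l.filter q := by
  intro l
  induction l with
  | nil => intro s _; simp
  | cons x t ih =>
    intro s h
    rw [List.foldl_cons]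
    cases hc : PySem.Set.contains s x
    · have hadd : PySem.Set.add s x = s ++ [x] := by
        simp only [PySem.Set.add, hc, Bool.false_eq_true, if_false]
      rw [hadd, ih (s ++ [x]) (by
        intro y hy
        have := h y hy
        simp [List.count_cons, List.count_append] at this ⊢
        omega)]
      cases hq : q x
      · simp [List.filter_append, hq]
      · simp [List.filter_append, hq]
    · have hmem : x ∈ s := by
        have h' := hc
        simp only [PySem.Set.contains] at h'
        exact List.contains_iff_mem.mp h'
      have hadd : PySem.Set.add s x = s := by
        simp only [PySem.Set.add, hc, if_true]
      have hqx : q x = false := by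
        by_contra hq
        have hq' : q x = true := by revert hq; cases q x <;> simp
        have := h x hq'
        have h1 : 1 ≤ s.count x := List.count_pos_iff.mpr hmem
        have h2 : 1 ≤ (x :: t).count x := by simp
        omega
      rw [hadd, ih s (by intro y hy; have := h y hy; simp only [List.count_cons] at this ⊢; omega)]
      simp [hqx]

-- A's two update branches are one insert of (previous count + 1).
theorem dict_step_eq (d : PySem.Dict Int Int) (n : Int) :
    (if d.contains n = true then d.insert n (d.getD n 0 + 1) else d.insert n 1)
      = d.insert n (d.getD n 0 + 1) := by
  cases hcon : d.contains n
  · simp only [Bool.false_eq_true, if_false]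
    have h0 : d.getD n 0 = 0 := by
      simp [PySem.Dict.getD_of_not_contains, hcon]
    rw [h0]
    norm_num
  · simp

theorem get_most_numbers_eq (numbers : List Int) :
    get_most_numbers numbers = get_most_numbers_alt numbers := by
  unfold get_most_numbers get_most_numbers_alt
  -- second loop: append-if over the dict items
  rw [PySem.List.foldl_if_eq_foldl_filter, PySem.List.foldl_append_singleton_eq_map]
  -- first loop: the odd test filters the input
  rw [PySem.List.foldl_if_eq_foldl_filter]
  have hfold : ∀ (l : List Int) (d : PySem.Dict Int Int),
      l.foldl (fun count n =>
        if count.contains n = true then count.insert n (count.getD n 0 + 1)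
        else count.insert n 1) d
      = l.foldl (fun count n => count.insert n (count.getD n 0 + 1)) d := by
    intro l
    induction l with
    | nil => intro d; rfl
    | cons y t ih => intro d; rw [List.foldl_cons, List.foldl_cons, dict_step_eq, ih]
  rw [hfold]
  rw [PySem.Dict.foldl_insert_getD_add_one_eq_counter, PySem.Dict.items_counter]
  set odds := numbers.filter (fun n => PySem.Int.mod n 2 == 1) with hodds
  rw [List.filter_map, List.map_map]
  have hcomp : (Prod.fst ∘ fun k => ((k : Int), (odds.count k : Int))) = id := rfl
  have hcomp2 : ((fun kv : Int × Int => kv.2 == 1) ∘ fun k => ((k : Int), (odds.count k : Int)))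
      = fun k => ((odds.count k : Int) == 1) := rfl
  rw [hcomp, hcomp2, List.map_id]
  rw [PySem.Set.ofList_eq_foldl,
      filter_foldl_set_add _ odds []
        (by
          intro x hx
          simp only [beq_iff_eq] at hx
          have hx1 : odds.count x = 1 := by exact_mod_cast hx
          simp [hx1])]
  rw [List.nil_append, hodds, List.filter_filter]
  apply List.filter_congr
  intro x hx
  cases hp : (PySem.Int.mod x 2 == 1)
  · simp
  · have hcnt : (numbers.filter (fun n => PySem.Int.mod n 2 == 1)).count x = numbers.count x :=
      List.count_filter hp
    simp only [← hodds] at hcnt ⊢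
    simp [hcnt, Nat.cast_eq_one]

-- ===== VERDICT (by name: the statement is the Claim_ definition above) =====
theorem get_most_numbers_spec : Claim_equal_get_most_numbers := by
  intro numbers _
  unfold Spec_get_most_numbers
  exact get_most_numbers_eq numbers
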